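-- pv_equiv track=rewrite | github.com/NeapolitanIcecream/cremona | src/cremona/core/routing.py | _count_dead_code_candidates
-- ===== SOURCE A (Python) =====
-- from typing import Any, Literal, Mapping
--
-- def _count_dead_code_candidates(
--     file_dead_code: list[dict[str, Any]],
-- ) -> tuple[int, int]:
--     high_confidence_dead_code = sum(
--         1
--         for item in file_dead_code
--         if item["classification"] == "high_confidence_candidate"
--     )
--     review_candidate_dead_code = sum(
--         1 for item in file_dead_code if item["classification"] == "review_candidate"
--     )
--     return (high_confidence_dead_code, review_candidate_dead_code)
-- ===== SOURCE B (Python) =====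
-- def _count_dead_code_candidates(file_dead_code):
--     counts = {}
--     for item in file_dead_code:
--         key = item["classification"]
--         counts[key] = counts.get(key, 0) + 1
--     return (
--         counts.get("high_confidence_candidate", 0),
--         counts.get("review_candidate", 0),
--     )
-- ===== Notes on version B (the rewrite author's own statement) =====
-- stated objective: idiomatic
-- what changed: Replaces A's two separate generator scans with one pass that builds a frequency table of classification values, then reads the two counts out of the table.
import Mathlib
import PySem

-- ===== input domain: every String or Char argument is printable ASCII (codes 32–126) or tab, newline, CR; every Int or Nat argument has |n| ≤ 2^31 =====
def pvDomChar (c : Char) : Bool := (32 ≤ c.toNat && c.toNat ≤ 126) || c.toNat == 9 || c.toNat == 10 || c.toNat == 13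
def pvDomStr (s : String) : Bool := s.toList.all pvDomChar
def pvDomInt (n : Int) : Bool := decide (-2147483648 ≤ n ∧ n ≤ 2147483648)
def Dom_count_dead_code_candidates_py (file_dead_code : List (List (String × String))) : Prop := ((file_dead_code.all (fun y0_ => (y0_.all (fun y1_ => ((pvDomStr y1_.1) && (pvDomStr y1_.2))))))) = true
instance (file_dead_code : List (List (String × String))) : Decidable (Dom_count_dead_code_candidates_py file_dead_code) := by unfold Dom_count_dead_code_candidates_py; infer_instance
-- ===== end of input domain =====

-- B builds one frequency table of the classification values in a single pass and reads the
-- two counts from it, instead of A's two separate scans. Same O(n) cost, one pass.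

-- ===== PORT A =====
-- two generator-sum passes; item["classification"] is a dict lookup (KeyError = none, excluded by Pre_)
def count_dead_code_candidates_py (file_dead_code : List (List (String × String))) : Int × Int :=
  let high_confidence_dead_code : Int := file_dead_code.foldl
    (fun acc item =>
      if (PySem.Dict.mk item).get? "classification" = some "high_confidence_candidate" then acc + 1 else acc) 0
  let review_candidate_dead_code : Int := file_dead_code.foldl
    (fun acc item =>
      if (PySem.Dict.mk item).get? "classification" = some "review_candidate" then acc + 1 else acc) 0
  (high_confidence_dead_code, review_candidate_dead_code)

-- ===== PORT B =====
-- one pass: counts[key] = counts.get(key, 0) + 1; the key lookup uses .getD "" — exact under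
-- Pre_ (the key is present; on a missing key Python raises KeyError, which Pre_ excludes)
def count_dead_code_candidates_py_alt (file_dead_code : List (List (String × String))) : Int × Int :=
  let counts : PySem.Dict String Int := file_dead_code.foldl
    (fun d item =>
      let key := ((PySem.Dict.mk item).get? "classification").getD ""
      d.insert key (d.getD key 0 + 1)) PySem.Dict.empty
  (counts.getD "high_confidence_candidate" 0, counts.getD "review_candidate" 0)

-- ===== PRECONDITION & SPEC =====
-- Pre_ excludes exactly the inputs where both Pythons raise KeyError: an item without a
-- "classification" key.
def Pre_count_dead_code_candidates_py (file_dead_code : List (List (String × String))) : Prop :=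
  ∀ item ∈ file_dead_code, (PySem.Dict.mk item).contains "classification" = true
instance (file_dead_code : List (List (String × String))) : Decidable (Pre_count_dead_code_candidates_py file_dead_code) := by unfold Pre_count_dead_code_candidates_py; infer_instance
def pvWitness_count_dead_code_candidates_py : (List (List (String × String))) :=
  [[("classification", "high_confidence_candidate")], [("classification", "other")]]
def Spec_count_dead_code_candidates_py (file_dead_code : List (List (String × String))) (out : Int × Int) : Prop := out = count_dead_code_candidates_py_alt file_dead_code
instance (file_dead_code : List (List (String × String))) (out : Int × Int) : Decidable (Spec_count_dead_code_candidates_py file_dead_code out) := by unfold Spec_count_dead_code_candidates_py; infer_instance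

-- ===== CLAIM (what is proved, stated in full; the proofs are below) =====
def Claim_equal_count_dead_code_candidates_py : Prop := ∀ (file_dead_code : List (List (String × String))), Dom_count_dead_code_candidates_py file_dead_code → Pre_count_dead_code_candidates_py file_dead_code → Spec_count_dead_code_candidates_py file_dead_code (count_dead_code_candidates_py file_dead_code)

-- ===== LEMMAS AND PROOFS =====

-- the classification key of one item, as B's fold computes it
def pvKey (item : List (String × String)) : String :=
  ((PySem.Dict.mk item).get? "classification").getD ""

-- B's one-pass table, read at any key, is the count of that key among the classification values
lemma pvB_getD (l : List (List (String × String))) (s : String) :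
    (l.foldl (fun d item =>
        d.insert (((PySem.Dict.mk item).get? "classification").getD "")
          (d.getD (((PySem.Dict.mk item).get? "classification").getD "") 0 + 1))
        PySem.Dict.empty).getD s 0 = ((l.map pvKey).count s : Int) := by
  rw [show (fun (d : PySem.Dict String Int) (item : List (String × String)) =>
        d.insert (((PySem.Dict.mk item).get? "classification").getD "")
          (d.getD (((PySem.Dict.mk item).get? "classification").getD "") 0 + 1))
      = (fun d item => d.insert (pvKey item) (d.getD (pvKey item) 0 + 1)) from rfl]
  have h : (l.map pvKey).foldl (fun (d : PySem.Dict String Int) x => d.insert x (d.getD x 0 + 1))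
      PySem.Dict.empty
    = l.foldl (fun d item => d.insert (pvKey item) (d.getD (pvKey item) 0 + 1)) PySem.Dict.empty :=
    List.foldl_map ..
  rw [← h, PySem.Dict.getD_foldl_insert_add_one, PySem.Dict.getD_empty]
  simp

-- A's counting fold equals the count of the key value, given the key is present everywhere
lemma pvFold_count (s : String) (l : List (List (String × String)))
    (h : ∀ item ∈ l, (PySem.Dict.mk item).contains "classification" = true) (acc : Int) :
    l.foldl (fun acc item =>
        if (PySem.Dict.mk item).get? "classification" = some s then acc + 1 else acc) acc
      = acc + ((l.map pvKey).count s : Int) := by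
  induction l generalizing acc with
  | nil => simp
  | cons x xs ih =>
    have hx : (((PySem.Dict.mk x).get? "classification")).isSome := by
      rw [← PySem.Dict.contains_eq_isSome_get?]; exact h x (by simp)
    obtain ⟨v, hv⟩ := Option.isSome_iff_exists.mp hx
    have hkey : pvKey x = v := by simp [pvKey, hv]
    rw [List.foldl_cons, ih (fun i hi => h i (by simp [hi]))]
    by_cases hs : v = s <;> simp [hv, hkey, hs] <;> ring

-- ===== VERDICT (by name: the statement is the Claim_ definition above) =====
theorem count_dead_code_candidates_py_spec : Claim_equal_count_dead_code_candidates_py := by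
  intro l _ hpre
  show _ = count_dead_code_candidates_py_alt l
  simp only [count_dead_code_candidates_py, count_dead_code_candidates_py_alt, Prod.mk.injEq]
  refine ⟨?_, ?_⟩ <;>
    · rw [pvB_getD, pvFold_count _ l hpre 0, zero_add]
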